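-- pv_equiv track=rewrite | github.com/cody-s-lee/advent2024 | day17.py | xlate
-- ===== SOURCE A (Python) =====
-- def xlate(a, b, c):
--     out = []
--
--     # do {
--     done = False
--     while not done:
--         # 2,4, -> bst (4->a)
--         b = a % 8
--
--         # 1,5, -> bxl (5)
--         b = b ^ 5
--
--         # 7,5, -> cdv (5->b)
--         c = a >> b
--
--         # 4,3, -> bxc (3->x)
--         b = b ^ c
--
--         # 1,6, -> bxl (6)
--         b = b ^ 6
--
--         # 0,3, -> adv (3)
--         a = a >> 3
--
--         # 5,5, -> out (5->b)
--         out.append(b % 8)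
--
--         # 3,0 -> jnz (0)
--         # } while a != 0
--         done = (a == 0)
--
--     return out
-- ===== SOURCE B (Python) =====
-- def xlate(a, b, c):
--     # Two-pass: first build the list of successive a>>3 shifts, then map the
--     # closed form of one loop body over it.
--     vals = [a]
--     while vals[-1] >= 8:
--         vals.append(vals[-1] >> 3)
--     return [(((v % 8) ^ 5) ^ (v >> ((v % 8) ^ 5)) ^ 6) % 8 for v in vals]
-- ===== Notes on version B (the rewrite author's own statement) =====
-- stated objective: alternative
-- what changed: Replaces the fused stateful do-while (mutating a,b,c and appending each iteration) with a two-pass shape: build the list of successive right-shifts of a, then map a closed-form of one loop body over it.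
import Mathlib
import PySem

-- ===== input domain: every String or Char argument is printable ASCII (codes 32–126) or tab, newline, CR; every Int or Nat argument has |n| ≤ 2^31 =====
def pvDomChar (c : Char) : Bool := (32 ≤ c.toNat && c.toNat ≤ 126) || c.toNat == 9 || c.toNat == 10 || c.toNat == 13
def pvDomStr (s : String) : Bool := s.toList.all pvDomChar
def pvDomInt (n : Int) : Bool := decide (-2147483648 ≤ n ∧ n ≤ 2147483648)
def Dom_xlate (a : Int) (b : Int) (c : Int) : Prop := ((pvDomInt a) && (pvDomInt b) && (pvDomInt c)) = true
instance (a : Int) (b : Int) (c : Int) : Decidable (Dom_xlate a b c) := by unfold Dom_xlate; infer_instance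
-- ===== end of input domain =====

-- ===== PORT A =====
-- B changes the decomposition only (build shift sequence, then map the loop body); same cost.
-- Loop of A: fuel a.natAbs+1 only makes the recursion total; for 0 <= a it never runs out.
def xlateLoop (fuel : Nat) (a b c : Int) (out : List Int) : List Int :=
  match fuel with
  | 0 => out
  | fuel + 1 =>
    let b := PySem.Int.mod a 8
    let b := PySem.Int.bxor b 5
    let c := a >>> b.toNat
    let b := PySem.Int.bxor b c
    let b := PySem.Int.bxor b 6
    let a := a >>> (3 : Nat)
    let out := out ++ [PySem.Int.mod b 8]
    if a = 0 then out else xlateLoop fuel a b c out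

def xlate (a : Int) (b : Int) (c : Int) : List Int :=
  xlateLoop (a.natAbs + 1) a b c []

-- ===== PORT B =====
-- the successive shifted values: a, a>>3, ..., first value < 8 (fuel is a totality guard only)
def xlateVals (fuel : Nat) (v : Int) : List Int :=
  match fuel with
  | 0 => [v]
  | fuel + 1 => if 8 ≤ v then v :: xlateVals fuel (v >>> (3 : Nat)) else [v]

def xlateStep (v : Int) : Int :=
  PySem.Int.mod (PySem.Int.bxor (PySem.Int.bxor (PySem.Int.bxor (PySem.Int.mod v 8) 5) (v >>> (PySem.Int.bxor (PySem.Int.mod v 8) 5).toNat)) 6) 8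

def xlate_alt (a : Int) (b : Int) (c : Int) : List Int :=
  (xlateVals (a.natAbs + 1) a).map xlateStep

-- ===== PRECONDITION & SPEC =====
-- Pre_ excludes a < 0: there the Python A loops forever (a >> 3 never reaches 0), returning nothing.
def Pre_xlate (a : Int) (b : Int) (c : Int) : Prop := 0 ≤ a
instance (a : Int) (b : Int) (c : Int) : Decidable (Pre_xlate a b c) := by unfold Pre_xlate; infer_instance
def pvWitness_xlate : Int × Int × Int := (9, 0, 0)
def Spec_xlate (a : Int) (b : Int) (c : Int) (out : List Int) : Prop := out = xlate_alt a b c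
instance (a : Int) (b : Int) (c : Int) (out : List Int) : Decidable (Spec_xlate a b c out) := by unfold Spec_xlate; infer_instance

-- ===== CLAIM =====
def Claim_equal_xlate : Prop := ∀ (a : Int) (b : Int) (c : Int), Dom_xlate a b c → Pre_xlate a b c → Spec_xlate a b c (xlate a b c)

-- ===== LEMMAS AND PROOFS =====

theorem pv_shift3 (a : Int) : a >>> (3 : Nat) = a / 8 := by
  rw [Int.shiftRight_eq_div_pow]; norm_num

theorem xlateLoop_succ (f : Nat) (a b0 c0 : Int) (out : List Int) :
    xlateLoop (f + 1) a b0 c0 out =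
      if a >>> (3 : Nat) = 0 then out ++ [xlateStep a]
      else xlateLoop f (a >>> (3 : Nat))
        (PySem.Int.bxor (PySem.Int.bxor (PySem.Int.bxor (PySem.Int.mod a 8) 5) (a >>> (PySem.Int.bxor (PySem.Int.mod a 8) 5).toNat)) 6)
        (a >>> (PySem.Int.bxor (PySem.Int.mod a 8) 5).toNat)
        (out ++ [xlateStep a]) := rfl

theorem xlateVals_succ (f : Nat) (v : Int) :
    xlateVals (f + 1) v = if 8 ≤ v then v :: xlateVals f (v >>> (3 : Nat)) else [v] := rfl

theorem pv_vals_stable : ∀ (f : Nat) (a : Int), 0 ≤ a → a < 8 ^ f →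
    xlateVals (f + 1) a = xlateVals f a := by
  intro f
  induction f with
  | zero =>
    intro a h0 h1
    simp at h1
    have : a = 0 := le_antisymm (by omega) h0
    subst this
    simp [xlateVals]
  | succ f ih =>
    intro a h0 h1
    by_cases h8 : 8 ≤ a
    · have hK : (0:Int) < 8 ^ f := by positivity
      have h1' : a < 8 * 8 ^ f := by rw [pow_succ] at h1; linarith [h1]
      have hrec : xlateVals (f + 1) (a >>> (3:Nat)) = xlateVals f (a >>> (3:Nat)) := by
        apply ih
        · rw [pv_shift3]; omega
        · rw [pv_shift3]
          have := Int.ediv_lt_iff_lt_mul (a := a) (b := (8:Int)) (c := 8 ^ f) (by norm_num)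
          omega
      rw [xlateVals_succ (f + 1) a, if_pos h8, hrec, xlateVals_succ f a, if_pos h8]
    · rw [xlateVals_succ (f + 1) a, if_neg h8, xlateVals_succ f a, if_neg h8]

theorem pv_main : ∀ (f : Nat) (a : Int), 0 ≤ a → a < 8 ^ f → ∀ (b c : Int) (out : List Int),
    xlateLoop (f + 1) a b c out = out ++ (xlateVals f a).map xlateStep := by
  intro f
  induction f with
  | zero =>
    intro a h0 h1 b c out
    simp at h1
    have : a = 0 := le_antisymm (by omega) h0
    subst this
    simp [xlateLoop, xlateVals, xlateStep]
  | succ f ih =>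
    intro a h0 h1 b c out
    rw [xlateLoop_succ]
    by_cases h8 : 8 ≤ a
    · have hK : (0:Int) < 8 ^ f := by positivity
      have h1' : a < 8 * 8 ^ f := by rw [pow_succ] at h1; linarith [h1]
      have hlt : a >>> (3:Nat) < 8 ^ f := by
        rw [pv_shift3]
        have := Int.ediv_lt_iff_lt_mul (a := a) (b := (8:Int)) (c := 8 ^ f) (by norm_num)
        omega
      have hne : ¬ a >>> (3:Nat) = 0 := by rw [pv_shift3]; omega
      have h0' : 0 ≤ a >>> (3:Nat) := by rw [pv_shift3]; omega
      rw [if_neg hne]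
      obtain ⟨g, rfl⟩ : ∃ g, f = g + 1 := by
        cases f with
        | zero =>
          exfalso
          simp at h1'
          rw [pv_shift3] at hne; omega
        | succ g => exact ⟨g, rfl⟩
      rw [ih _ h0' hlt, xlateVals_succ (g + 1) a, if_pos h8]
      simp
    · have hz : a >>> (3:Nat) = 0 := by rw [pv_shift3]; omega
      rw [if_pos hz, xlateVals_succ, if_neg h8]
      simp

theorem pv_lt_pow (n : Nat) : (n : Int) < 8 ^ n := by
  induction n with
  | zero => norm_num
  | succ n ih =>
    have h1 : (1:Int) ≤ 8 ^ n := one_le_pow₀ (by norm_num)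
    calc ((n + 1 : Nat) : Int) = (n : Int) + 1 := by push_cast; ring
    _ < 8 ^ n + 1 := by linarith
    _ ≤ 8 ^ n + 7 * 8 ^ n := by linarith
    _ = 8 ^ (n + 1) := by ring

-- ===== VERDICT =====
theorem xlate_spec : Claim_equal_xlate := by
  intro a b c _ hpre
  have h0 : (0:Int) ≤ a := hpre
  have ha : a = (a.natAbs : Int) := by omega
  have hb : a < 8 ^ a.natAbs := by rw [ha]; exact_mod_cast pv_lt_pow a.natAbs
  show xlate a b c = xlate_alt a b c
  unfold xlate xlate_alt
  rw [pv_main a.natAbs a h0 hb, pv_vals_stable a.natAbs a h0 hb]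
  simp
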